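-- pv_equiv track=rewrite | github.com/SeaBreamQueen/LinearAlgebra | matrixRREFcheck.py | condition3
-- ===== SOURCE A (Python) =====
-- def condition3(matrix):
--     rows = []
--     for row in matrix:
--         rows.append((findLeadingEntry(row),leadingEntryValue(row)))
--     for data in rows:
--         if data[0] == -1:
--             continue
--         elif not data[1] == 1:
--             return False
--     return True
--
-- def findLeadingEntry(row):
--     i = 0
--     for n in row:
--         if not n == 0:
--             return i
--         i = i + 1
--     return -1
--
-- def leadingEntryValue(row):
--     for n in row:
--         if not n == 0:
--             return n
--     return 0
-- ===== SOURCE B (Python) =====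
-- def condition3(matrix):
--     for row in matrix:
--         for n in row:
--             if n != 0:
--                 if n != 1:
--                     return False
--                 break
--     return True
-- ===== Notes on version B (the rewrite author's own statement) =====
-- stated objective: simpler
-- what changed: A materializes a list of (leading index, leading value) pairs via two separate helper scans per row and then re-scans that list; B is one fused pass: each row is scanned once for its first nonzero with immediate False on a non-1 leader, no intermediate table and no helpers.
import Mathlib
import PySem

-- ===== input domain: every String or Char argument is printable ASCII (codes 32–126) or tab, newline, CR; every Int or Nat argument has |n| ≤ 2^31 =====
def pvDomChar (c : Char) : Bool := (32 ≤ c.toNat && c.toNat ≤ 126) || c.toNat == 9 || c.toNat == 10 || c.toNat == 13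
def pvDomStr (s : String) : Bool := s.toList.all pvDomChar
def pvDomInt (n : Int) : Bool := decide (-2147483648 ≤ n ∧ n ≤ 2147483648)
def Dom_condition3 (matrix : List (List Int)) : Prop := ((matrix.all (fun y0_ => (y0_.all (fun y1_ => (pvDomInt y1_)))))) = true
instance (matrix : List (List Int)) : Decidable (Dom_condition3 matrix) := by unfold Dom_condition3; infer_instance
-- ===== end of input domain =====

-- B replaces A's intermediate (index,value) table built by two helper scans per row with one
-- fused early-exiting scan per row; objective: simpler.

-- ===== PORT A =====
-- helper findLeadingEntry: counter i starts at 0, returns index of first nonzero, else -1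
def findLeadingEntryAux (row : List Int) (i : Int) : Int :=
  match row with
  | [] => -1
  | n :: rest => if ¬ (n = 0) then i else findLeadingEntryAux rest (i + 1)

def findLeadingEntry (row : List Int) : Int := findLeadingEntryAux row 0

-- helper leadingEntryValue: first nonzero value, else 0
def leadingEntryValue (row : List Int) : Int :=
  match row with
  | [] => 0
  | n :: rest => if ¬ (n = 0) then n else leadingEntryValue rest

-- second loop of A over the materialized rows list
def condition3Check (rows : List (Int × Int)) : Bool :=
  match rows with
  | [] => true
  | data :: rest =>
    if data.1 = -1 then condition3Check rest
    else if ¬ (data.2 = 1) then false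
    else condition3Check rest

def condition3 (matrix : List (List Int)) : Bool :=
  condition3Check (matrix.map (fun row => (findLeadingEntry row, leadingEntryValue row)))

-- ===== PORT B =====
-- inner fused scan: ok-status of a row (first nonzero must be 1; break after it)
def rowLeaderOk (row : List Int) : Bool :=
  match row with
  | [] => true
  | n :: rest => if ¬ (n = 0) then (if ¬ (n = 1) then false else true) else rowLeaderOk rest

def condition3_alt (matrix : List (List Int)) : Bool :=
  match matrix with
  | [] => true
  | row :: rest => if rowLeaderOk row then condition3_alt rest else false

-- ===== PRECONDITION & SPEC =====
def Spec_condition3 (matrix : List (List Int)) (out : Bool) : Prop := out = condition3_alt matrix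
instance (matrix : List (List Int)) (out : Bool) : Decidable (Spec_condition3 matrix out) := by unfold Spec_condition3; infer_instance

-- ===== CLAIM (what is proved, stated in full; the proofs are below) =====
def Claim_equal_condition3 : Prop := ∀ (matrix : List (List Int)), Dom_condition3 matrix → Spec_condition3 matrix (condition3 matrix)

-- ===== LEMMAS AND PROOFS =====
theorem rowLemma (row : List Int) (i : Int) (h : 0 ≤ i) :
    rowLeaderOk row = (if findLeadingEntryAux row i = -1 then true
                       else if ¬ (leadingEntryValue row = 1) then false else true) := by
  induction row generalizing i with
  | nil => simp [rowLeaderOk, findLeadingEntryAux]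
  | cons n rest ih =>
    by_cases hn : n = 0
    · rw [show rowLeaderOk (n :: rest) = rowLeaderOk rest by simp [rowLeaderOk, hn],
          show findLeadingEntryAux (n :: rest) i = findLeadingEntryAux rest (i + 1) by
            simp [findLeadingEntryAux, hn],
          show leadingEntryValue (n :: rest) = leadingEntryValue rest by
            simp [leadingEntryValue, hn]]
      exact ih (i + 1) (by omega)
    · have hi : ¬ (i = -1) := by omega
      simp [rowLeaderOk, findLeadingEntryAux, leadingEntryValue, hn, hi]

theorem mainLemma (matrix : List (List Int)) : condition3 matrix = condition3_alt matrix := by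
  induction matrix with
  | nil => rfl
  | cons row rest ih =>
    simp only [condition3, List.map, condition3Check, condition3_alt] at *
    rw [show findLeadingEntry row = findLeadingEntryAux row 0 from rfl]
    rw [← ih]
    rw [rowLemma row 0 (by omega)]
    by_cases h1 : findLeadingEntryAux row 0 = -1
    · simp [h1]
    · by_cases h2 : leadingEntryValue row = 1 <;> simp [h1, h2]

-- ===== VERDICT (by name: the statement is the Claim_ definition above) =====
theorem condition3_spec : Claim_equal_condition3 := by
  intro matrix _
  unfold Spec_condition3
  exact mainLemma matrix
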